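-- pv_equiv track=rewrite | github.com/N21DCDT030LeNgocHuyHoang/PYTHON | BT THUC HANH CHUONG 2/bai_3_Mang_TrungHang.py | Mang_TrungHang
-- ===== SOURCE A (Python) =====
-- def Mang_TrungHang(matrix):
--     num_rows = len(matrix)
--     row_set = set()
--
--     for row in matrix:
--         row_tuple = tuple(row)
--         if row_tuple in row_set:
--             return True
--         else:
--             row_set.add(row_tuple)
--     return False
-- ===== SOURCE B (Python) =====
-- def Mang_TrungHang(matrix):
--     rows = sorted(matrix)
--     return any(a == b for a, b in zip(rows, rows[1:]))
-- ===== Notes on version B (the rewrite author's own statement) =====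
-- stated objective: alternative
-- what changed: Replaces A's hash-set membership loop with early return by a comparison-based sort of the rows followed by a single adjacent-pair equality scan (duplicates are adjacent in sorted order).
import Mathlib
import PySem

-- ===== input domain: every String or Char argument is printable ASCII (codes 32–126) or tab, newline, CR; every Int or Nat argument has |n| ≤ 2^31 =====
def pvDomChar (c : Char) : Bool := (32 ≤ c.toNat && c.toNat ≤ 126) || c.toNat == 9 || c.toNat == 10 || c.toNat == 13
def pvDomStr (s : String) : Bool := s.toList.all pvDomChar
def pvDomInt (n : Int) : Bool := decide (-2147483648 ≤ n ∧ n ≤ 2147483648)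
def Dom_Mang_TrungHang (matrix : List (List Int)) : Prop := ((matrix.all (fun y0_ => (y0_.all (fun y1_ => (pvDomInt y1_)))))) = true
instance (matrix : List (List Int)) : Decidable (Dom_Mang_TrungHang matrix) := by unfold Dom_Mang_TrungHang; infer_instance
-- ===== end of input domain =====

-- B replaces A's hash-set loop (with early return) by sort-then-adjacent-equality-scan (same task, different algorithm).
-- ===== PORT A =====
-- A's for-loop with early 'return True': structural recursion carrying row_set.
def MangLoopA (rowSet : PySem.Set (List Int)) : List (List Int) → Bool
  | [] => false
  | row :: rest =>
    if PySem.Set.contains rowSet row then true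
    else MangLoopA (PySem.Set.add rowSet row) rest

def Mang_TrungHang (matrix : List (List Int)) : Bool :=
  MangLoopA PySem.Set.empty matrix

-- ===== PORT B =====
-- 'any(a == b for a, b in zip(rows, rows[1:]))': scan of adjacent pairs.
def adjAnyEq : List (List Int) → Bool
  | a :: b :: rest => a == b || adjAnyEq (b :: rest)
  | _ => false

def Mang_TrungHang_alt (matrix : List (List Int)) : Bool :=
  adjAnyEq (PySem.List.sorted matrix (fun x => x) false)

-- ===== PRECONDITION & SPEC =====
def Spec_Mang_TrungHang (matrix : List (List Int)) (out : Bool) : Prop := out = Mang_TrungHang_alt matrix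
instance (matrix : List (List Int)) (out : Bool) : Decidable (Spec_Mang_TrungHang matrix out) := by unfold Spec_Mang_TrungHang; infer_instance

-- ===== CLAIM (what is proved, stated in full; the proofs are below) =====
def Claim_equal_Mang_TrungHang : Prop := ∀ (matrix : List (List Int)), Dom_Mang_TrungHang matrix → Spec_Mang_TrungHang matrix (Mang_TrungHang matrix)

-- ===== LEMMAS AND PROOFS =====
-- A's loop answers: does the remainder contain a row already seen, or a duplicate among itself?
theorem MangLoopA_true_iff (s : PySem.Set (List Int)) (l : List (List Int)) :
    MangLoopA s l = true ↔ (∃ x ∈ l, x ∈ s) ∨ ¬ l.Nodup := by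
  induction l generalizing s with
  | nil => simp [MangLoopA]
  | cons x xs ih =>
    by_cases hx : x ∈ s
    · have hc : PySem.Set.contains s x = true := by simp [PySem.Set.contains, hx]
      simp only [MangLoopA, if_pos hc, true_iff]
      exact Or.inl ⟨x, List.mem_cons_self .., hx⟩
    · have hc : PySem.Set.contains s x ≠ true := by simp [PySem.Set.contains, hx]
      have hadd : PySem.Set.add s x = s ++ [x] := by simp [PySem.Set.add, hx]
      simp only [MangLoopA, if_neg hc, ih]
      constructor
      · rintro (⟨y, hy, hys⟩ | h)
        · rw [hadd, List.mem_append, List.mem_singleton] at hys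
          rcases hys with hys | rfl
          · exact Or.inl ⟨y, List.mem_cons_of_mem _ hy, hys⟩
          · exact Or.inr (fun hn => (List.nodup_cons.mp hn).1 hy)
        · exact Or.inr (fun hn => h (List.nodup_cons.mp hn).2)
      · rintro (⟨y, hy, hys⟩ | h)
        · rcases List.mem_cons.mp hy with rfl | hy'
          · exact absurd hys hx
          · exact Or.inl ⟨y, hy', by rw [hadd]; exact List.mem_append_left _ hys⟩
        · by_cases hxm : x ∈ xs
          · exact Or.inl ⟨x, hxm, by rw [hadd]; exact List.mem_append_right _ (List.mem_singleton_self x)⟩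
          · exact Or.inr (fun hn => h (List.nodup_cons.mpr ⟨hxm, hn⟩))

-- On a list sorted weakly increasingly, an adjacent equal pair exists iff the list has a duplicate.
theorem adjAnyEq_true_iff (l : List (List Int)) (hs : l.Pairwise (· ≤ ·)) :
    adjAnyEq l = true ↔ ¬ l.Nodup := by
  induction l with
  | nil => simp [adjAnyEq]
  | cons a t ih =>
    cases t with
    | nil => simp [adjAnyEq]
    | cons b u =>
      have hab : a ≤ b := (List.pairwise_cons.mp hs).1 b (List.mem_cons_self ..)
      have hs' : (b :: u).Pairwise (· ≤ ·) := (List.pairwise_cons.mp hs).2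
      by_cases heq : a = b
      · subst heq
        simp [adjAnyEq, List.nodup_cons]
      · have hna : a ∉ b :: u := by
          intro hmem
          rcases List.mem_cons.mp hmem with rfl | hu
          · exact heq rfl
          · exact absurd (le_antisymm hab ((List.pairwise_cons.mp hs').1 a hu)) heq
        rw [show adjAnyEq (a :: b :: u) = (a == b || adjAnyEq (b :: u)) from rfl]
        simp only [Bool.or_eq_true, beq_iff_eq, heq, false_or, ih hs']
        constructor
        · exact fun h hn => h (List.nodup_cons.mp hn).2
        · exact fun h hn2 => h (List.nodup_cons.mpr ⟨hna, hn2⟩)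

-- ===== VERDICT (by name: the statement is the Claim_ definition above) =====
theorem Mang_TrungHang_spec : Claim_equal_Mang_TrungHang := by
  intro matrix _
  unfold Spec_Mang_TrungHang Mang_TrungHang Mang_TrungHang_alt
  have hperm : (PySem.List.sorted matrix (fun x => x) false).Perm matrix :=
    PySem.List.sorted_perm ..
  -- sorted_pairwise is stated with the LinearOrder instances; transport it to the port's
  -- (definitionally-compatible) instances
  have hpw : (PySem.List.sorted matrix (fun x : List Int => x) false).Pairwise (· ≤ ·) := by
    have h := PySem.List.sorted_pairwise (κ := List Int) matrix (fun x => x)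
    convert h using 2
  have h1 := MangLoopA_true_iff PySem.Set.empty matrix
  have h2 := adjAnyEq_true_iff _ hpw
  simp only [PySem.Set.empty, List.not_mem_nil, and_false, exists_false, false_or] at h1
  apply Bool.eq_iff_iff.mpr
  simp only [PySem.Set.empty]
  rw [h1, h2, hperm.nodup_iff]
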